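-- pv_equiv track=rewrite | github.com/dlzhry2/immunisation-fhir-api | backend/src/models/utils/generic_utils.py | nhs_number_mod11_check
-- ===== SOURCE A (Python) =====
-- def nhs_number_mod11_check(nhs_number: str) -> bool:
--     """
--     Parameters:-
--     nhs_number: str
--         The NHS number to be checked.
--     Returns:-
--         True if the nhs number passes the mod 11 check, False otherwise.
--
--     Definition of NHS number can be found at:
--     https://www.datadictionary.nhs.uk/attributes/nhs_number.html
--     """
--     is_mod11 = False
--     if nhs_number.isdigit() and len(nhs_number) == 10:
--         # Create a reversed list of weighting factors
--         weighting_factors = list(range(2, 11))[::-1]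
--         # Multiply each of the first nine digits by the weighting factor and add the results of each multiplication
--         # together
--         total = sum(int(digit) * weight for digit, weight in zip(nhs_number[:-1], weighting_factors))
--         # Divide the total by 11 and establish the remainder and subtract the remainder from 11 to give the check digit.
--         # If the result is 11 then a check digit of 0 is used. If the result is 10 then the NHS NUMBER is invalid and
--         # not used.
--         check_digit = 0 if (total % 11 == 0) else (11 - (total % 11))
--         # Check the remainder matches the check digit. If it does not, the NHS NUMBER is invalid.
--         is_mod11 = check_digit == int(nhs_number[-1])
--
--     return is_mod11
-- ===== SOURCE B (Python) =====
-- def nhs_number_mod11_check(nhs_number: str) -> bool: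
--     """Valid iff the full 10-digit string's weighted sum (weights 10..1) is divisible by 11."""
--     if nhs_number.isdigit() and len(nhs_number) == 10:
--         total = sum(int(digit) * weight for digit, weight in zip(nhs_number, range(10, 0, -1)))
--         return total % 11 == 0
--     return False
-- ===== Notes on version B (the rewrite author's own statement) =====
-- stated objective: simpler
-- what changed: Replaces the explicit check-digit computation (weights 10..2 over the first nine digits, the 11-minus-remainder branch with its special 0 case, and a comparison against the tenth digit) by one weighted sum over all ten digits with weights 10..1 and a single divisibility-by-11 test.
import Mathlib
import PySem

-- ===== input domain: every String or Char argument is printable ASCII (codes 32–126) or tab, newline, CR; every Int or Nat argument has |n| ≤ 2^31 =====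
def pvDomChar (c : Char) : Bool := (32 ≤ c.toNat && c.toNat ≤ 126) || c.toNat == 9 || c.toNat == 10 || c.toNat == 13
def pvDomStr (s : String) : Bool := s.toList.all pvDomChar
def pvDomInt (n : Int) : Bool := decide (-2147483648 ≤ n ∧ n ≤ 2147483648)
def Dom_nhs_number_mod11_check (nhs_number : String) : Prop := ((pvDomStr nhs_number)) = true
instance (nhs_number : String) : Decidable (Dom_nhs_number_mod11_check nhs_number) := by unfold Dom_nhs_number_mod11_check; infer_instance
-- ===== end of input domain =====

-- B replaces A's explicit check-digit computation (weights 10..2 over the first nine digits,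
-- then the 11−remainder branch compared against digit ten) by a single weighted sum over all
-- ten digits with weights 10..1 and one divisibility-by-11 test; objective: simpler.

-- int(digit) for a single char: exact for '0'..'9', which the isdigit guard ensures in both ports
def pvIntDigit (c : Char) : Int := (c.toNat : Int) - 48

-- ===== PORT A =====
def nhs_number_mod11_check (nhs_number : String) : Bool :=
  let is_mod11 := false
  if PySem.Str.strIsdigit nhs_number && (PySem.Str.len nhs_number == 10) then
    -- list(range(2, 11))[::-1]  (step -1 slice never raises: step ≠ 0, so getD is never taken)
    let weighting_factors := (PySem.List.slice? (PySem.List.pyRange 2 11 1) none none (-1)).getD []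
    -- sum(int(digit) * weight for digit, weight in zip(nhs_number[:-1], weighting_factors))
    let total := ((List.zip (PySem.List.slice nhs_number.toList none (some (-1))) weighting_factors).map
        (fun p => pvIntDigit p.1 * p.2)).sum
    let check_digit : Int := if PySem.Int.mod total 11 == 0 then 0 else 11 - PySem.Int.mod total 11
    -- int(nhs_number[-1])  (never none: the guard forces length 10)
    check_digit == pvIntDigit ((PySem.List.pyGet? nhs_number.toList (-1)).getD ' ')
  else is_mod11

-- ===== PORT B =====
def nhs_number_mod11_check_alt (nhs_number : String) : Bool :=
  if PySem.Str.strIsdigit nhs_number && (PySem.Str.len nhs_number == 10) then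
    -- sum(int(digit) * weight for digit, weight in zip(nhs_number, range(10, 0, -1)))
    let total := ((List.zip nhs_number.toList (PySem.List.pyRange 10 0 (-1))).map
        (fun p => pvIntDigit p.1 * p.2)).sum
    PySem.Int.mod total 11 == 0
  else false

-- ===== PRECONDITION & SPEC =====
def Spec_nhs_number_mod11_check (nhs_number : String) (out : Bool) : Prop := out = nhs_number_mod11_check_alt nhs_number
instance (nhs_number : String) (out : Bool) : Decidable (Spec_nhs_number_mod11_check nhs_number out) := by unfold Spec_nhs_number_mod11_check; infer_instance

-- ===== CLAIM (what is proved, stated in full; the proofs are below) =====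
def Claim_equal_nhs_number_mod11_check : Prop := ∀ (nhs_number : String), Dom_nhs_number_mod11_check nhs_number → Spec_nhs_number_mod11_check nhs_number (nhs_number_mod11_check nhs_number)

-- ===== LEMMAS AND PROOFS =====

lemma pvIntDigit_bounds (c : Char) (h : PySem.Chars.isdigit c = true) :
    0 ≤ pvIntDigit c ∧ pvIntDigit c ≤ 9 := by
  simp only [PySem.Chars.isdigit, Bool.and_eq_true, decide_eq_true_eq, Char.le_def] at h
  obtain ⟨h1, h2⟩ := h
  have e1 : ('0' : Char).val.toNat = 48 := by decide
  have e2 : ('9' : Char).val.toNat = 57 := by decide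
  have l1 : ('0' : Char).val.toNat ≤ c.val.toNat := UInt32.le_iff_toNat_le.mp h1
  have l2 : c.val.toNat ≤ ('9' : Char).val.toNat := UInt32.le_iff_toNat_le.mp h2
  simp only [pvIntDigit, Char.toNat]
  omega

-- ===== VERDICT (by name: the statement is the Claim_ definition above) =====
theorem nhs_number_mod11_check_spec : Claim_equal_nhs_number_mod11_check := by
  intro s _
  unfold Spec_nhs_number_mod11_check nhs_number_mod11_check nhs_number_mod11_check_alt
  by_cases hg : (PySem.Str.strIsdigit s && (PySem.Str.len s == 10)) = true
  · rw [if_pos hg, if_pos hg]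
    have hdig : s.toList.all PySem.Chars.isdigit = true := by
      have := hg
      simp [PySem.Str.strIsdigit, PySem.Chars.strIsdigit] at this
      simp only [List.all_eq_true]
      exact this.1.2
    have hlen : s.toList.length = 10 := by
      have := hg
      simp [PySem.Str.len] at this
      exact_mod_cast this.2
    generalize hl : s.toList = l at hdig hlen ⊢
    obtain ⟨c0, c1, c2, c3, c4, c5, c6, c7, c8, c9, rfl⟩ :
        ∃ c0 c1 c2 c3 c4 c5 c6 c7 c8 c9,
          l = [c0, c1, c2, c3, c4, c5, c6, c7, c8, c9] := by
      rcases l with _|⟨c0,_|⟨c1,_|⟨c2,_|⟨c3,_|⟨c4,_|⟨c5,_|⟨c6,_|⟨c7,_|⟨c8,_|⟨c9,_|⟨c10,t⟩⟩⟩⟩⟩⟩⟩⟩⟩⟩⟩ <;>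
        simp at hlen
      exact ⟨c0, c1, c2, c3, c4, c5, c6, c7, c8, c9, rfl⟩
    simp only [List.all_cons, List.all_nil, Bool.and_eq_true, Bool.and_true] at hdig
    obtain ⟨h0, h1, h2, h3, h4, h5, h6, h7, h8, h9⟩ := hdig
    have hr1 : PySem.List.pyRange 2 11 1 = [2, 3, 4, 5, 6, 7, 8, 9, 10] := by decide
    have hr2 : PySem.List.pyRange 10 0 (-1) = [10, 9, 8, 7, 6, 5, 4, 3, 2, 1] := by decide
    rw [PySem.List.slice?_none_none_neg_one, hr1, hr2, PySem.List.slice_to_neg_one]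
    simp only [Option.getD_some, PySem.List.pyGet?_neg_one]
    norm_num [List.dropLast, List.zip, List.zipWith, List.getLast?]
    obtain ⟨hb0, hb9⟩ := pvIntDigit_bounds c9 h9
    split_ifs <;> omega
  · rw [if_neg hg, if_neg hg]
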